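-- pv_equiv track=rewrite | github.com/MuhraAlMahri/Surgical_ChainOfThought | categorize_questions.py | extract_unique_questions
-- ===== SOURCE A (Python) =====
-- from typing import Dict, List
--
-- def extract_unique_questions(data: List[Dict]) -> List[str]:
--     """Extract unique questions from data."""
--     questions = set()
--     for item in data:
--         if 'question' in item:
--             questions.add(item['question'])
--         elif isinstance(item, str):
--             questions.add(item)
--
--     return sorted(list(questions))
-- ===== SOURCE B (Python) =====
-- from typing import Dict, List
--
-- def extract_unique_questions(data: List[Dict]) -> List[str]:
--     """Extract unique questions from data (collect, sort, adjacent-dedup)."""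
--     values = []
--     for item in data:
--         if 'question' in item:
--             values.append(item['question'])
--         elif isinstance(item, str):
--             values.append(item)
--     values = sorted(values)
--     result = []
--     for v in values:
--         if not result or result[-1] != v:
--             result.append(v)
--     return result
-- ===== Notes on version B (the rewrite author's own statement) =====
-- stated objective: alternative
-- what changed: Replaces the set accumulator with a plain list of all accepted values, then sorts it and removes duplicates in a single adjacent-comparison scan over the sorted list.
import Mathlib
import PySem

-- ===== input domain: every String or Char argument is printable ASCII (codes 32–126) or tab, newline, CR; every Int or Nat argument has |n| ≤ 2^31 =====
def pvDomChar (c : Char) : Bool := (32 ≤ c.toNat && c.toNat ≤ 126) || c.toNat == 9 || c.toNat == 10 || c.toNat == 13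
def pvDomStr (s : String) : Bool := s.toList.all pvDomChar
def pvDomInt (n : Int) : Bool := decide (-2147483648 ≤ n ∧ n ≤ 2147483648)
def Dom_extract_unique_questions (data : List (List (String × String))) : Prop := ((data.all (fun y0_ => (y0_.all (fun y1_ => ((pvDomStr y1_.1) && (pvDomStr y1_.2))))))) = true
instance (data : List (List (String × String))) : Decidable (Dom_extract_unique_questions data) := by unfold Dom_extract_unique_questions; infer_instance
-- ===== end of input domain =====

-- B changes the data structure: a plain list of accepted values, sorted then deduplicated by one
-- adjacent-comparison scan, instead of A's set accumulator; same cost, proved to return the same list.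
-- (Each item of `data` is a dict here, so A's `elif isinstance(item, str)` branch never fires.)

-- ===== PORT A =====
-- set accumulator: add item['question'] whenever the key is present; return sorted(list(set)).
def extract_unique_questions (data : List (List (String × String))) : List String :=
  let questions : PySem.Set String := data.foldl (fun qs item =>
    let d := PySem.Dict.ofList item
    if d.contains "question" then PySem.Set.add qs (d.getD "question" "") else qs)
    PySem.Set.empty
  PySem.List.sorted questions (fun x => x) false

-- ===== PORT B =====
-- list accumulator of all accepted values; sorted(values); then one scan appending v only when
-- result is empty or result[-1] != v.
def extract_unique_questions_alt (data : List (List (String × String))) : List String :=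
  let values : List String := data.foldl (fun vs item =>
    let d := PySem.Dict.ofList item
    if d.contains "question" then vs ++ [d.getD "question" ""] else vs)
    []
  let svals := PySem.List.sorted values (fun x => x) false
  svals.foldl (fun res v => if res.getLast? = some v then res else res ++ [v]) []

-- ===== PRECONDITION & SPEC =====
def Spec_extract_unique_questions (data : List (List (String × String))) (out : List String) : Prop := out = extract_unique_questions_alt data
instance (data : List (List (String × String))) (out : List String) : Decidable (Spec_extract_unique_questions data out) := by unfold Spec_extract_unique_questions; infer_instance

-- ===== CLAIM (what is proved, stated in full; the proofs are below) =====
def Claim_equal_extract_unique_questions : Prop := ∀ (data : List (List (String × String))), Dom_extract_unique_questions data → Spec_extract_unique_questions data (extract_unique_questions data)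

-- ===== LEMMAS AND PROOFS =====

-- the list of accepted values, in data order (the common extraction of both loops)
def pvVals : List (List (String × String)) → List String
  | [] => []
  | item :: rest =>
    (let d := PySem.Dict.ofList item
     if d.contains "question" then [d.getD "question" ""] else []) ++ pvVals rest

-- adjacent dedup after a known last element
def pvDed : String → List String → List String
  | _, [] => []
  | a, x :: xs => if x = a then pvDed a xs else x :: pvDed x xs

theorem pvfoldA (data : List (List (String × String))) :
    ∀ qs : PySem.Set String,
      data.foldl (fun qs item =>
        let d := PySem.Dict.ofList item
        if d.contains "question" then PySem.Set.add qs (d.getD "question" "") else qs) qs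
      = (pvVals data).foldl PySem.Set.add qs := by
  induction data with
  | nil => intro qs; rfl
  | cons item rest ih =>
    intro qs
    simp only [List.foldl_cons, pvVals, List.foldl_append]
    split <;> simp [ih]

theorem pvfoldB (data : List (List (String × String))) :
    ∀ vs : List String,
      data.foldl (fun vs item =>
        let d := PySem.Dict.ofList item
        if d.contains "question" then vs ++ [d.getD "question" ""] else vs) vs
      = vs ++ pvVals data := by
  induction data with
  | nil => intro vs; simp [pvVals]
  | cons item rest ih =>
    intro vs
    simp only [List.foldl_cons, pvVals]
    split <;> simp [ih]

theorem pvfoldDed (l : List String) :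
    ∀ (acc : List String) (a : String),
      l.foldl (fun res v => if res.getLast? = some v then res else res ++ [v]) (acc ++ [a])
      = acc ++ [a] ++ pvDed a l := by
  induction l with
  | nil => intro acc a; simp [pvDed]
  | cons x xs ih =>
    intro acc a
    have hga : (acc ++ [a]).getLast? = some a := by simp
    simp only [List.foldl_cons, pvDed, hga]
    by_cases hx : x = a
    · simp [hx, ih]
    · rw [if_neg (by simp [Ne.symm hx]), if_neg hx]
      simpa using ih (acc ++ [a]) x

theorem pvDed_subset (l : List String) : ∀ a, pvDed a l ⊆ l := by
  induction l with
  | nil => intro a; simp [pvDed]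
  | cons x xs ih =>
    intro a y hy
    simp only [pvDed] at hy
    by_cases hx : x = a
    · rw [if_pos hx] at hy; exact List.mem_cons_of_mem _ (ih a hy)
    · rw [if_neg hx] at hy
      rcases List.mem_cons.1 hy with h | h
      · exact h ▸ List.mem_cons_self
      · exact List.mem_cons_of_mem _ (ih x h)

theorem pvDed_complete (l : List String) : ∀ a y, y ∈ a :: l → y ∈ a :: pvDed a l := by
  induction l with
  | nil => intro a y h; simpa [pvDed] using h
  | cons x xs ih =>
    intro a y hy
    simp only [pvDed]
    by_cases hx : x = a
    · rw [if_pos hx]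
      rcases List.mem_cons.1 hy with h | h
      · exact h ▸ List.mem_cons_self
      · exact ih a y (by subst hx; exact h)
    · rw [if_neg hx]
      rcases List.mem_cons.1 hy with h | h
      · exact h ▸ List.mem_cons_self
      · exact List.mem_cons_of_mem _ (ih x y h)

theorem pvDed_pairwise (l : List String) :
    ∀ a, (a :: l).Pairwise (· ≤ ·) → (a :: pvDed a l).Pairwise (· < ·) := by
  induction l with
  | nil => intro a _; simp [pvDed]
  | cons x xs ih =>
    intro a h
    rcases List.pairwise_cons.1 h with ⟨ha, hxs⟩
    simp only [pvDed]
    by_cases hx : x = a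
    · rw [if_pos hx]
      apply ih a
      apply List.pairwise_cons.2
      refine ⟨fun y hy => ha y (List.mem_cons_of_mem _ hy), (List.pairwise_cons.1 hxs).2⟩
    · rw [if_neg hx]
      have hax : a < x := lt_of_le_of_ne (ha x List.mem_cons_self) (Ne.symm hx)
      have hrec := ih x hxs
      apply List.pairwise_cons.2
      refine ⟨?_, hrec⟩
      intro y hy
      rcases List.mem_cons.1 hy with h | h
      · exact h ▸ hax
      · exact lt_trans hax ((List.pairwise_cons.1 hrec).1 y h)

-- the key fact: sorted(set(l)) equals the adjacent-dedup of sorted(l)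
theorem pv_sorted_set_eq_ded (l : List String) :
    PySem.List.sorted (PySem.Set.ofList l) (fun x => x) false
    = (PySem.List.sorted l (fun x => x) false).foldl
        (fun res v => if res.getLast? = some v then res else res ++ [v]) [] := by
  cases hs : PySem.List.sorted l (fun x => x) false with
  | nil =>
    have : l = [] := (PySem.List.sorted_eq_nil_iff l (fun x => x) false).1 hs
    subst this
    rfl
  | cons m t =>
    have hfold := pvfoldDed t [] m
    simp only [List.nil_append] at hfold
    rw [List.foldl_cons]
    have hlast : ([] : List String).getLast? ≠ some m := by simp
    rw [if_neg hlast]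
    simp only [List.nil_append]
    rw [hfold]
    -- now show sorted (Set.ofList l) = [m] ++ pvDed m t
    have hsortedle : (m :: t).Pairwise (· ≤ ·) := by
      have := PySem.List.sorted_pairwise l (fun x : String => x)
      rw [hs] at this; exact this
    have hlt : (m :: pvDed m t).Pairwise (· < ·) := pvDed_pairwise t m hsortedle
    have hnd1 : (m :: pvDed m t).Nodup := hlt.imp ne_of_lt
    have hnd2 : (PySem.Set.ofList l).Nodup := PySem.Set.nodup_ofList l
    have hmemsort : ∀ y, y ∈ m :: t ↔ y ∈ l := by
      intro y
      rw [← hs]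
      exact PySem.List.mem_sorted l (fun x : String => x) false y
    have hmem : ∀ y, y ∈ m :: pvDed m t ↔ y ∈ PySem.Set.ofList l := by
      intro y
      rw [PySem.Set.mem_ofList, ← hmemsort y]
      constructor
      · intro h
        rcases List.mem_cons.1 h with h | h
        · exact h ▸ List.mem_cons_self
        · exact List.mem_cons_of_mem _ (pvDed_subset t m h)
      · exact pvDed_complete t m y
    have hperm : (m :: pvDed m t).Perm (PySem.Set.ofList l) :=
      (List.perm_ext_iff_of_nodup hnd1 hnd2).2 hmem
    have := PySem.List.sorted_eq_of_perm_of_pairwise_lt (PySem.Set.ofList l)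
      (m :: pvDed m t) (fun x : String => x) hperm (by simpa using hlt)
    simpa using this

-- ===== VERDICT (by name: the statement is the Claim_ definition above) =====
theorem extract_unique_questions_spec : Claim_equal_extract_unique_questions := by
  intro data _
  unfold Spec_extract_unique_questions extract_unique_questions extract_unique_questions_alt
  rw [pvfoldA data PySem.Set.empty, pvfoldB data []]
  simp only [List.nil_append]
  have hof : List.foldl PySem.Set.add PySem.Set.empty (pvVals data) = PySem.Set.ofList (pvVals data) :=
    (PySem.Set.ofList_eq_foldl (pvVals data)).symm
  rw [hof]
  exact pv_sorted_set_eq_ded (pvVals data)
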